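-- pv_equiv track=rewrite | github.com/johnnytam100/FPredX | FPredX_predict.py | convert_multiline_fasta_to_singleline
-- ===== SOURCE A (Python) =====
-- def convert_multiline_fasta_to_singleline(fasta):
--     for i in range(len(fasta)-1):
--         if fasta[i].count('>') == 0 and fasta[i+1].count('>') == 0:
--             fasta[i] = fasta[i].replace('\n','')
--
--     for i in range(len(fasta)-2, -1, -1):
--         if fasta[i][-1:] != "\n":
--             fasta[i] = fasta[i] + fasta.pop(i+1)
--     return fasta
-- ===== SOURCE B (Python) =====
-- def convert_multiline_fasta_to_singleline(fasta):
--     result = []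
--     for line, nxt in zip(fasta, fasta[1:] + [">"]):
--         cur = line.replace('\n', '') if line.count('>') == 0 and nxt.count('>') == 0 else line
--         if result and result[-1][-1:] != '\n':
--             result[-1] += cur
--         else:
--             result.append(cur)
--     fasta[:] = result
--     return fasta
-- ===== Notes on version B (the rewrite author's own statement) =====
-- stated objective: simpler
-- what changed: A's two sequential in-place passes (a stripping loop, then a backward loop that merges lines by popping the successor) are replaced by one forward pass that strips and merges in a single traversal while building a fresh result list, written back with fasta[:] = result.
import Mathlib
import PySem

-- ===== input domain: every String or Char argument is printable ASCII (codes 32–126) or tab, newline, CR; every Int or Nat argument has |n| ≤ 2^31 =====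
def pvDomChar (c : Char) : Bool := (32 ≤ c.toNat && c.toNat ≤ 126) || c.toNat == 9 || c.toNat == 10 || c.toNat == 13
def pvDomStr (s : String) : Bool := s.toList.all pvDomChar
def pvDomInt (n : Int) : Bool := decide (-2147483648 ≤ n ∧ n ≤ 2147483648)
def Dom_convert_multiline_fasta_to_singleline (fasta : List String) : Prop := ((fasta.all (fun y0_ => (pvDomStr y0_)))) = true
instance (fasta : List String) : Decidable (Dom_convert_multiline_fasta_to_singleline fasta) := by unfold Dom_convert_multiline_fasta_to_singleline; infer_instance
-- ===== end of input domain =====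

-- B replaces A's two in-place passes (strip loop + backward pop-merge loop) by one forward pass
-- building a fresh result list (objective: simpler single pass). Both Pythons mutate the argument
-- to the same final list; the equivalence proved here is about the RETURN value.

-- ===== PORT A =====
-- body of A's first loop: fasta[i] = fasta[i].replace('\n','') under the '>'-count test
-- (indices produced by the range are always in bounds, so the pyGetD default "" is never used)
def pvStepA1 (st : List String) (i : Int) : List String :=
  if PySem.Str.count (PySem.List.pyGetD st i "") ">" == 0
      && PySem.Str.count (PySem.List.pyGetD st (i+1) "") ">" == 0 then
    PySem.List.pySetD st i (PySem.Str.replace (PySem.List.pyGetD st i "") "\n" "")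
  else st

-- body of A's second loop: fasta[i] = fasta[i] + fasta.pop(i+1) when fasta[i][-1:] != '\n'
-- (i+1 is always in bounds when the branch is taken — proved below — so the `none` arm is dead)
def pvStepA2 (st : List String) (i : Int) : List String :=
  if PySem.Str.slice (PySem.List.pyGetD st i "") (some (-1)) none != "\n" then
    match PySem.List.pop? st (i+1) with
    | some r => PySem.List.pySetD r.2 i (PySem.List.pyGetD st i "" ++ r.1)
    | none => st
  else st

def convert_multiline_fasta_to_singleline (fasta : List String) : List String :=
  let f1 := (PySem.List.pyRange 0 ((fasta.length : Int) - 1) 1).foldl pvStepA1 fasta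
  (PySem.List.pyRange ((f1.length : Int) - 2) (-1) (-1)).foldl pvStepA2 f1

-- ===== PORT B =====
-- B's loop body over (line, nxt) pairs: strip, then merge into the open last result line or append
def pvStepB (res : List String) (p : String × String) : List String :=
  let cur := if PySem.Str.count p.1 ">" == 0 && PySem.Str.count p.2 ">" == 0
             then PySem.Str.replace p.1 "\n" "" else p.1
  if !res.isEmpty && (PySem.Str.slice (res.getLastD "") (some (-1)) none != "\n") then
    res.dropLast ++ [res.getLastD "" ++ cur]
  else res ++ [cur]

def convert_multiline_fasta_to_singleline_alt (fasta : List String) : List String :=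
  (fasta.zip (PySem.List.slice fasta (some 1) none ++ [">"])).foldl pvStepB []

-- ===== PRECONDITION & SPEC =====
def Spec_convert_multiline_fasta_to_singleline (fasta : List String) (out : List String) : Prop := out = convert_multiline_fasta_to_singleline_alt fasta
instance (fasta : List String) (out : List String) : Decidable (Spec_convert_multiline_fasta_to_singleline fasta out) := by unfold Spec_convert_multiline_fasta_to_singleline; infer_instance

-- ===== CLAIM (what is proved, stated in full; the proofs are below) =====
def Claim_equal_convert_multiline_fasta_to_singleline : Prop := ∀ (fasta : List String), Dom_convert_multiline_fasta_to_singleline fasta → Spec_convert_multiline_fasta_to_singleline fasta (convert_multiline_fasta_to_singleline fasta)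

-- ===== LEMMAS AND PROOFS =====

-- `s[-1:] != '\n'`: the line does NOT end with a newline (the merge condition of both programs)
def pvNL (s : String) : Bool := PySem.Str.slice s (some (-1)) none != "\n"

-- the strip applied to a line paired with its successor
def pvStrip (p : String × String) : String :=
  if PySem.Str.count p.1 ">" == 0 && PySem.Str.count p.2 ">" == 0
  then PySem.Str.replace p.1 "\n" "" else p.1

-- one right-to-left merge step (what A's pop-loop does at one index)
def pvG (x : String) (r : List String) : List String :=
  if pvNL x then (match r with | [] => [x] | y :: t => (x ++ y) :: t) else x :: r

-- the fully merged list
def pvMB (L : List String) : List String := L.foldr pvG []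

-- the stripped list (A's state after its first loop)
def pvSM : List String → List String
  | [] => []
  | [x] => [x]
  | x :: y :: t => pvStrip (x, y) :: pvSM (y :: t)

-- forward merging with an open accumulator line (B's pass, last result line factored out)
def pvFwd : String → List String → List String
  | a, [] => [a]
  | a, c :: L => if pvNL a then pvFwd (a ++ c) L else a :: pvFwd c L

-- B's merge step on (result, current stripped line)
def pvMS (res : List String) (cur : String) : List String :=
  if !res.isEmpty && pvNL (res.getLastD "") then res.dropLast ++ [res.getLastD "" ++ cur]
  else res ++ [cur]

theorem pvNL_empty : pvNL "" = true := by decide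

theorem pvNL_append (a c : String) (h : c ≠ "") : pvNL (a ++ c) = pvNL c := by
  have hc : c.toList ≠ [] := by
    intro hnil; exact h (by cases c; simp_all)
  have hp : 0 < c.toList.length := List.length_pos_iff.mpr hc
  have hs : PySem.Str.slice (a ++ c) (some (-1)) none = PySem.Str.slice c (some (-1)) none := by
    apply String.ext_iff.mpr
    simp only [PySem.Str.toList_slice, PySem.Chars.slice_eq_listSlice,
      PySem.List.slice_from_neg_one, String.toList_append]
    have hlen : (a.toList ++ c.toList).length - 1 = a.toList.length + (c.toList.length - 1) := by
      rw [List.length_append]; omega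
    rw [hlen, List.drop_append]
    simp
  simp [pvNL, hs]

theorem pvG_ne_nil (x : String) (r : List String) : pvG x r ≠ [] := by
  unfold pvG; split
  · cases r <;> simp
  · simp

theorem pvMB_cons (x : String) (L : List String) : pvMB (x :: L) = pvG x (pvMB L) := rfl

theorem pvMB_ne_nil (x : String) (L : List String) : ∃ h t2, pvMB (x :: L) = h :: t2 := by
  rw [pvMB_cons]
  rcases hg : pvG x (pvMB L) with _ | ⟨h, t2⟩
  · exact absurd hg (pvG_ne_nil x (pvMB L))
  · exact ⟨h, t2, rfl⟩

theorem pvMB_singleton (x : String) : pvMB [x] = [x] := by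
  by_cases h : pvNL x = true <;> simp [pvMB, pvG, h]

theorem pvG_assoc (a c : String) (R : List String) (h : pvNL a = true) :
    pvG a (pvG c R) = pvG (a ++ c) R := by
  by_cases hc : c = ""
  · subst hc
    simp only [String.append_empty]
    cases R with
    | nil => simp [pvG, pvNL_empty, h]
    | cons y t => simp [pvG, pvNL_empty, h, String.empty_append]
  · have hac : pvNL (a ++ c) = pvNL c := pvNL_append a c hc
    by_cases hcc : pvNL c = true
    · cases R with
      | nil => simp [pvG, h, hcc, hac]
      | cons y t => simp [pvG, h, hcc, hac, String.append_assoc]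
    · simp [pvG, h, hcc, hac]

theorem pvFwd_eq (L : List String) : ∀ a, pvFwd a L = pvG a (pvMB L) := by
  induction L with
  | nil => intro a; by_cases h : pvNL a = true <;> simp [pvFwd, pvMB, pvG, h]
  | cons c L ih =>
    intro a
    by_cases h : pvNL a = true
    · rw [show pvFwd a (c :: L) = pvFwd (a ++ c) L by simp [pvFwd, h],
        ih (a ++ c), pvMB_cons, pvG_assoc a c _ h]
    · rw [show pvFwd a (c :: L) = a :: pvFwd c L by simp [pvFwd, h],
        ih c, pvMB_cons]
      simp [pvG, h]

theorem pvMS_fold (L : List String) : ∀ (r : List String) (a : String),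
    L.foldl pvMS (r ++ [a]) = r ++ pvFwd a L := by
  induction L with
  | nil => intro r a; simp [pvFwd]
  | cons c L ih =>
    intro r a
    have h1 : pvMS (r ++ [a]) c =
        if pvNL a = true then r ++ [a ++ c] else (r ++ [a]) ++ [c] := by
      simp [pvMS]
    by_cases h : pvNL a = true
    · rw [List.foldl_cons, h1, if_pos h, ih r (a ++ c),
        show pvFwd a (c :: L) = pvFwd (a ++ c) L by simp [pvFwd, h]]
    · rw [List.foldl_cons, h1, if_neg h, ih (r ++ [a]) c,
        show pvFwd a (c :: L) = a :: pvFwd c L by simp [pvFwd, h]]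
      simp

theorem pvMS_fold_nil (L : List String) : L.foldl pvMS [] = pvMB L := by
  cases L with
  | nil => rfl
  | cons a L =>
    have h0 : pvMS [] a = [] ++ [a] := by simp [pvMS]
    rw [List.foldl_cons, h0, pvMS_fold L [] a]
    simp [pvFwd_eq, pvMB_cons]

theorem pvStrip_sentinel (x : String) : pvStrip (x, ">") = x := by
  have h1 : PySem.Chars.count ['>'] ['>'] = 1 := by decide
  simp [pvStrip, h1]

theorem pvZip_eq_pvSM (L : List String) :
    (L.zip (L.drop 1 ++ [">"])).map pvStrip = pvSM L := by
  induction L with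
  | nil => rfl
  | cons x t ih =>
    cases t with
    | nil => simp [pvSM, pvStrip_sentinel]
    | cons y t' =>
      simp only [List.drop_one, List.tail_cons, pvSM]
      rw [← ih]
      simp

theorem pvAlt_eq (fasta : List String) :
    convert_multiline_fasta_to_singleline_alt fasta = pvMB (pvSM fasta) := by
  unfold convert_multiline_fasta_to_singleline_alt
  rw [PySem.List.slice_from_one, ← List.drop_one]
  have hstep : pvStepB = fun res p => pvMS res (pvStrip p) := rfl
  rw [hstep, ← List.foldl_map, pvZip_eq_pvSM, pvMS_fold_nil]

-- ----- A's first loop computes pvSM -----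
theorem pvStrip_loop : ∀ (ys pre : List String),
    (PySem.List.pyRange (pre.length : Int) ((pre.length : Int) + (ys.length : Int) - 1) 1).foldl
      pvStepA1 (pre ++ ys) = pre ++ pvSM ys := by
  intro ys
  induction ys with
  | nil =>
    intro pre
    rw [PySem.List.pyRange_one_eq_nil (by simp)]
    simp [pvSM]
  | cons x t ih =>
    intro pre
    cases t with
    | nil =>
      rw [PySem.List.pyRange_one_eq_nil (by simp)]
      simp [pvSM]
    | cons y t' =>
      rw [PySem.List.pyRange_one_cons (by simp; omega)]
      rw [List.foldl_cons]
      have hget0 : PySem.List.pyGetD (pre ++ x :: y :: t') (pre.length : Int) "" = x := by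
        rw [PySem.List.pyGetD_natCast]
        simp
      have hget1 : PySem.List.pyGetD (pre ++ x :: y :: t') ((pre.length : Int) + 1) "" = y := by
        have := PySem.List.pyGetD_natCast (pre ++ x :: y :: t') (pre.length + 1) ""
        push_cast at this
        rw [this]
        simp
      have hstep : pvStepA1 (pre ++ x :: y :: t') (pre.length : Int) =
          (pre ++ [pvStrip (x, y)]) ++ y :: t' := by
        unfold pvStepA1 pvStrip
        rw [hget0, hget1]
        split
        · rw [PySem.List.pySetD_natCast]
          simp_all
        · simp_all
      rw [hstep]
      have key := ih (pre ++ [pvStrip (x, y)])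
      have e1 : (((pre ++ [pvStrip (x, y)]).length : Nat) : Int) = (pre.length : Int) + 1 := by
        simp
      rw [e1] at key
      have e2 : (pre.length : Int) + 1 + ((y :: t').length : Int) - 1
          = (pre.length : Int) + ((x :: y :: t').length : Int) - 1 := by
        simp; ring
      rw [e2] at key
      rw [show (pre ++ [pvStrip (x, y)]) ++ y :: t' = pre ++ [pvStrip (x, y)] ++ y :: t' by simp] at key
      rw [key]
      simp [pvSM]

-- ----- A's second loop computes pvMB -----
-- what pvStepA2 does at index q.length of a state q ++ x :: h :: t2
theorem pvStepA2_at (q : List String) (x h : String) (t2 : List String) :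
    pvStepA2 (q ++ x :: h :: t2) ((q.length : Nat) : Int) = q ++ pvG x (h :: t2) := by
  unfold pvStepA2
  have hget : PySem.List.pyGetD (q ++ x :: h :: t2) ((q.length : Nat) : Int) "" = x := by
    rw [PySem.List.pyGetD_natCast]
    simp
  rw [hget, show (PySem.Str.slice x (some (-1)) none != "\n") = pvNL x from rfl]
  by_cases hx : pvNL x = true
  · rw [if_pos hx]
    have hlen : q.length + 1 < (q ++ x :: h :: t2).length := by simp
    have hpop : PySem.List.pop? (q ++ x :: h :: t2) (((q.length : Nat) : Int) + 1)
        = some (h, q ++ x :: t2) := by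
      have := PySem.List.pop?_natCast (q ++ x :: h :: t2) (q.length + 1) hlen
      push_cast at this
      rw [this]
      congr 1
      refine Prod.ext ?_ ?_
      · show (q ++ x :: h :: t2)[q.length + 1] = h
        rw [List.getElem_append_right (by omega)]
        simp
      · show (q ++ x :: h :: t2).eraseIdx (q.length + 1) = q ++ x :: t2
        rw [List.eraseIdx_append_of_length_le (by omega)]
        simp
    rw [hpop]
    show PySem.List.pySetD (q ++ x :: t2) ((q.length : Nat) : Int) (x ++ h) = q ++ pvG x (h :: t2)
    rw [PySem.List.pySetD_natCast, List.set_append_right _ _ (by omega)]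
    simp [pvG, hx]
  · rw [if_neg hx]
    simp [pvG, hx]

theorem pvMerge_loop : ∀ (k : Nat) (pre tail : List String), pre.length = k + 1 → tail ≠ [] →
    (PySem.List.pyRange ((k : Nat) : Int) (-1) (-1)).foldl pvStepA2 (pre ++ pvMB tail)
      = pvMB (pre ++ tail) := by
  intro k
  induction k with
  | zero =>
    rintro pre (_ | ⟨a, l⟩) hpre htail
    · exact absurd rfl htail
    obtain ⟨x, hx⟩ : ∃ x, pre = [x] := by
      cases pre with
      | nil => simp at hpre
      | cons b m => cases m with
        | nil => exact ⟨b, rfl⟩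
        | cons c m' => simp at hpre
    subst hx
    obtain ⟨h, t2, hmb⟩ := pvMB_ne_nil a l
    rw [PySem.List.pyRange_neg_one_cons (by omega), PySem.List.pyRange_neg_one_eq_nil (by omega),
      List.foldl_cons, List.foldl_nil, hmb,
      show ([x] ++ a :: l : List String) = x :: a :: l from rfl, pvMB_cons, hmb]
    have := pvStepA2_at [] x h t2
    simpa using this
  | succ k ih =>
    rintro pre tail hpre htail
    have hpne : pre ≠ [] := by intro h; subst h; simp at hpre
    obtain ⟨q, x, hqx, hq⟩ : ∃ q x, pre = q ++ [x] ∧ q.length = k + 1 := by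
      refine ⟨pre.dropLast, pre.getLast hpne, (List.dropLast_append_getLast hpne).symm, ?_⟩
      simp [List.length_dropLast, hpre]
    subst hqx
    cases tail with
    | nil => exact absurd rfl htail
    | cons a l =>
    obtain ⟨h, t2, hmb⟩ := pvMB_ne_nil a l
    rw [PySem.List.pyRange_neg_one_cons (by push_cast; omega), List.foldl_cons, hmb,
      show ((q ++ [x]) ++ h :: t2 : List String) = q ++ x :: h :: t2 by simp,
      show (((k + 1 : Nat) : Int)) = ((q.length : Nat) : Int) by rw [hq],
      pvStepA2_at q x h t2,
      show ((q.length : Nat) : Int) - 1 = ((k : Nat) : Int) by rw [hq]; push_cast; ring,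
      show q ++ pvG x (h :: t2) = q ++ pvMB (x :: a :: l) by rw [pvMB_cons, hmb]]
    rw [ih q (x :: a :: l) hq (by simp)]
    simp

theorem pvLoop2_all (zs : List String) :
    (PySem.List.pyRange ((zs.length : Int) - 2) (-1) (-1)).foldl pvStepA2 zs = pvMB zs := by
  match zs with
  | [] => rw [PySem.List.pyRange_neg_one_eq_nil (by simp)]; rfl
  | [x] =>
    rw [PySem.List.pyRange_neg_one_eq_nil (by simp)]
    rw [List.foldl_nil, pvMB_singleton]
  | x :: y :: t =>
    have hne : (x :: y :: t : List String) ≠ [] := by simp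
    have hlast := List.dropLast_append_getLast hne
    have key := pvMerge_loop t.length ((x :: y :: t).dropLast) [(x :: y :: t).getLast hne]
      (by simp) (by simp)
    rw [pvMB_singleton, hlast] at key
    rw [show ((x :: y :: t : List String).length : Int) - 2 = ((t.length : Nat) : Int) by
      simp; ring]
    rw [key]

theorem pvA_eq (fasta : List String) :
    convert_multiline_fasta_to_singleline fasta = pvMB (pvSM fasta) := by
  unfold convert_multiline_fasta_to_singleline
  have h1 : (PySem.List.pyRange 0 ((fasta.length : Int) - 1) 1).foldl pvStepA1 fasta
      = pvSM fasta := by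
    have := pvStrip_loop fasta []
    simpa using this
  rw [h1, pvLoop2_all]

-- ===== VERDICT (by name: the statement is the Claim_ definition above) =====
theorem convert_multiline_fasta_to_singleline_spec : Claim_equal_convert_multiline_fasta_to_singleline := by
  intro fasta _
  unfold Spec_convert_multiline_fasta_to_singleline
  rw [pvA_eq, pvAlt_eq]
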